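-- pv_equiv track=rewrite | github.com/rathohit311356/dcos-commons | tools/diagnostics/full_bundle.py | is_service_scheduler_task
-- ===== SOURCE A (Python) =====
-- def to_dcos_service_name(service_name: str) -> str:
--     """DC/OS service names don't contain the first slash.
--     e.g.:     SDK service name     ->   DC/OS service name
--           /data-services/cassandra -> data-services/cassandra
--     """
--     return service_name.lstrip("/")
--
-- def is_service_scheduler_task(package_name: str, service_name: str, task: dict) -> bool:
--     labels = task.get("labels", [])
--     dcos_package_name = next(
--         iter([l.get("value") for l in labels if l.get("key") == "DCOS_PACKAGE_NAME"]), ""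
--     )
--     dcos_service_name = next(
--         iter([l.get("value") for l in labels if l.get("key") == "DCOS_SERVICE_NAME"]), ""
--     )
--     return dcos_package_name == package_name and dcos_service_name == to_dcos_service_name(
--         service_name
--     )
-- ===== SOURCE B (Python) =====
-- def to_dcos_service_name(service_name: str) -> str:
--     return service_name.lstrip("/")
--
-- def is_service_scheduler_task(package_name: str, service_name: str, task: dict) -> bool:
--     d = {}
--     for l in task.get("labels", []):
--         k = l.get("key")
--         if k not in d:
--             d[k] = l.get("value")
--     return d.get("DCOS_PACKAGE_NAME", "") == package_name and d.get(
--         "DCOS_SERVICE_NAME", ""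
--     ) == to_dcos_service_name(service_name)
-- ===== Notes on version B (the rewrite author's own statement) =====
-- stated objective: idiomatic
-- what changed: Replaces the two filtered list-comprehension scans over the labels with a single pass that builds a first-wins key->value dict, then answers with two constant-time dict lookups.
import Mathlib
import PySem

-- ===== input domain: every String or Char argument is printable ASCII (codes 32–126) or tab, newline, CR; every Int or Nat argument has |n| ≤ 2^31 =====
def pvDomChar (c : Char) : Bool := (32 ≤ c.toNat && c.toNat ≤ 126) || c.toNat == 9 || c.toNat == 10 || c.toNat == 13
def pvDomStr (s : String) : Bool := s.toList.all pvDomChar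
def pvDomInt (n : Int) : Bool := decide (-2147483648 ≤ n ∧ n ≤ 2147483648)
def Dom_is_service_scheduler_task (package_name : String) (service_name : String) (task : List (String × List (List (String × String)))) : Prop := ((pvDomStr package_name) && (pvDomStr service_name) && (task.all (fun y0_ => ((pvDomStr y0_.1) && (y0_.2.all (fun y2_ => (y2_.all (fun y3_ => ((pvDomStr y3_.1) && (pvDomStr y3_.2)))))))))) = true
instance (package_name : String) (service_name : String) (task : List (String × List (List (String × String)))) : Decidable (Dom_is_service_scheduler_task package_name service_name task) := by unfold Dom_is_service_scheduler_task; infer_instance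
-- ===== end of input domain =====

-- B replaces A's two filtered scans over the labels with one pass building a
-- first-wins key→value dict followed by two lookups (objective: idiomatic).

-- d.get(k) on an association-list dict: first match, None (= none) if absent.
-- Shared helper of both ports (each Python calls dict.get the same way).
def pvGetA (l : List (String × String)) (k : String) : Option String :=
  (l.find? (fun p => p.1 == k)).map (·.2)

-- task.get("labels", []): first match in the association list, default [].
def pvLabels (task : List (String × List (List (String × String)))) :
    List (List (String × String)) :=
  ((task.find? (fun p => p.1 == "labels")).map (·.2)).getD []

-- s.lstrip("/"): drop leading '/' characters (hand port, exact: the chars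
-- argument is the one-character set {'/'}).
def to_dcos_service_name (service_name : String) : String :=
  String.ofList (service_name.toList.dropWhile (· == '/'))

-- ===== PORT A =====
def is_service_scheduler_task (package_name : String) (service_name : String) (task : List (String × List (List (String × String)))) : Bool :=
  let labels := pvLabels task
  -- next(iter([...]), "") yields either a label's value (possibly None) or "";
  -- modelled as Option String with the default being some "".
  let dcos_package_name : Option String :=
    ((labels.filter (fun l => pvGetA l "key" == some "DCOS_PACKAGE_NAME")).map
      (fun l => pvGetA l "value")).headD (some "")
  let dcos_service_name : Option String :=
    ((labels.filter (fun l => pvGetA l "key" == some "DCOS_SERVICE_NAME")).map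
      (fun l => pvGetA l "value")).headD (some "")
  -- Python `None == str` is False, so compare against `some _`.
  (dcos_package_name == some package_name) &&
    (dcos_service_name == some (to_dcos_service_name service_name))

-- ===== PORT B =====
def is_service_scheduler_task_alt (package_name : String) (service_name : String) (task : List (String × List (List (String × String)))) : Bool :=
  let d : PySem.Dict (Option String) (Option String) :=
    (pvLabels task).foldl
      (fun d l =>
        let k := pvGetA l "key"
        if d.contains k then d else d.insert k (pvGetA l "value"))
      PySem.Dict.empty
  (d.getD (some "DCOS_PACKAGE_NAME") (some "") == some package_name) &&
    (d.getD (some "DCOS_SERVICE_NAME") (some "") == some (to_dcos_service_name service_name))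

-- ===== PRECONDITION & SPEC =====
def Spec_is_service_scheduler_task (package_name : String) (service_name : String) (task : List (String × List (List (String × String)))) (out : Bool) : Prop := out = is_service_scheduler_task_alt package_name service_name task
instance (package_name : String) (service_name : String) (task : List (String × List (List (String × String)))) (out : Bool) : Decidable (Spec_is_service_scheduler_task package_name service_name task out) := by unfold Spec_is_service_scheduler_task; infer_instance

-- ===== CLAIM (what is proved, stated in full; the proofs are below) =====
def Claim_equal_is_service_scheduler_task : Prop := ∀ (package_name : String) (service_name : String) (task : List (String × List (List (String × String)))), Dom_is_service_scheduler_task package_name service_name task → Spec_is_service_scheduler_task package_name service_name task (is_service_scheduler_task package_name service_name task)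

-- ===== LEMMAS AND PROOFS =====

-- A's scan for key K: first value (as an Option) among labels whose "key" is K.
def pvFirstVal (K : Option String) (labels : List (List (String × String))) :
    Option (Option String) :=
  ((labels.filter (fun l => pvGetA l "key" == K)).map (fun l => pvGetA l "value")).head?

-- Invariant of B's first-wins loop: a lookup in the folded dict is the
-- accumulator's answer, or else A's first-match scan over the remaining labels.
theorem pvFold_get (labels : List (List (String × String)))
    (acc : PySem.Dict (Option String) (Option String)) (K : Option String) :
    (labels.foldl
      (fun d l =>
        let k := pvGetA l "key"
        if d.contains k then d else d.insert k (pvGetA l "value")) acc).get? K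
      = (acc.get? K).or (pvFirstVal K labels) := by
  induction labels generalizing acc with
  | nil => simp [pvFirstVal]
  | cons l ls ih =>
    simp only [List.foldl_cons]
    rw [ih]
    by_cases hk : pvGetA l "key" = K
    · subst hk
      by_cases hc : acc.contains (pvGetA l "key") = true
      · rcases (PySem.Dict.contains_eq_isSome_get? acc (pvGetA l "key") ▸ hc :
            (acc.get? (pvGetA l "key")).isSome = true) with h
        obtain ⟨v, hv⟩ := Option.isSome_iff_exists.mp h
        simp [hc, pvFirstVal, hv]
      · simp only [hc, if_neg, Bool.false_eq_true, not_false_iff]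
        rw [PySem.Dict.get?_insert_self]
        have hnone : acc.get? (pvGetA l "key") = none := by
          have := PySem.Dict.contains_eq_isSome_get? acc (pvGetA l "key")
          rw [this] at hc
          simpa using hc
        simp [hnone, pvFirstVal]
    · have hb : (pvGetA l "key" == K) = false := by
        simpa using hk
      by_cases hc : acc.contains (pvGetA l "key") = true
      · simp [hc, pvFirstVal, hb]
      · simp only [hc, Bool.false_eq_true, not_false_iff, if_neg]
        rw [PySem.Dict.get?_insert]
        simp [pvFirstVal, hb, Ne.symm hk]

theorem pvLookup_eq (labels : List (List (String × String))) (K : String) :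
    ((labels.foldl
      (fun d l =>
        let k := pvGetA l "key"
        if d.contains k then d else d.insert k (pvGetA l "value"))
      PySem.Dict.empty).getD (some K) (some ""))
      = ((labels.filter (fun l => pvGetA l "key" == some K)).map
          (fun l => pvGetA l "value")).headD (some "") := by
  rw [PySem.Dict.getD_eq_get?_getD, pvFold_get]
  simp [pvFirstVal, List.headD_eq_head?_getD]

-- ===== VERDICT (by name: the statement is the Claim_ definition above) =====
theorem is_service_scheduler_task_spec : Claim_equal_is_service_scheduler_task := by
  intro package_name service_name task _
  unfold Spec_is_service_scheduler_task
  simp only [is_service_scheduler_task, is_service_scheduler_task_alt, pvLookup_eq]
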